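-- pv_equiv track=rewrite | github.com/netsus/Rosalind | BA1J.py | most_frequent_kmer_below_d_mismatches
-- ===== SOURCE A (Python) =====
-- from collections import Counter
--
-- complement_DNA_table = str.maketrans("ATGC","TACG")
--
-- complement_RNA_table = str.maketrans("AUGC","UACG")
--
-- def reverse_complement(seq, rna=False):
--     if rna:
--         return seq[::-1].translate(complement_RNA_table)
--     else:
--         return seq[::-1].translate(complement_DNA_table)
--
-- def list_below_d_mismatch(seq,d):
--     if d == 0:
--         return [seq]
--     if len(seq) == 1 and d >= 1:
--         return [base for base in 'ATGC']
--     res=[]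
--     for base in 'ATGC':
--         if seq[0] != base:
--             res.extend( base + suffix for suffix in list_below_d_mismatch(seq[1:] , d-1) )
--         else:
--             res.extend( base + suffix for suffix in list_below_d_mismatch(seq[1:] , d) )
--     return res
--
-- def most_frequent_kmer_below_d_mismatches(seq,k,d):
--     counter = Counter()
--
--     for i in range(len(seq) - k + 1):
--         subseq = seq[i : i+k]
--         for kmer in list_below_d_mismatch(subseq,d):
--             counter[kmer] += 1
--
--     r_seq = reverse_complement(seq)
--     for i in range(len(seq) - k + 1):
--         subseq = r_seq[i : i+k]
--         for kmer in list_below_d_mismatch(subseq,d):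
--             counter[kmer] += 1
--
--     maxCnt = max(counter.values())
--
--     return [kmer for kmer in counter if counter[kmer] == maxCnt]
-- ===== SOURCE B (Python) =====
-- from collections import Counter
--
--
-- def most_frequent_kmer_below_d_mismatches(seq, k, d):
--     comp = {'A': 'T', 'T': 'A', 'G': 'C', 'C': 'G'}
--
--     # Iterative suffix DP replacing the per-window recursive neighbour generation:
--     # rows[b] is the list of neighbours of the current suffix w[j:] within budget b,
--     # built back-to-front; produces the k-mers in exactly the recursion's order.
--     def neighbors(w):
--         kk = len(w)
--         dd = min(d, kk)                # budgets beyond the window length change nothing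
--         rows = [[w[kk:]]]              # empty suffix: only budget 0
--         for j in range(kk - 1, -1, -1):
--             new = [[w[j:]]]            # budget 0: the literal suffix
--             for b in range(1, dd + 1):
--                 if j == kk - 1:
--                     new.append(['A', 'T', 'G', 'C'])
--                 else:
--                     acc = []
--                     for base in 'ATGC':
--                         acc.extend(base + suf for suf in rows[b if base == w[j] else b - 1])
--                     new.append(acc)
--             rows = new
--         return rows[dd]
--
--     rc = ''.join(comp.get(c, c) for c in reversed(seq))
--     wins = []
--     for s in (seq, rc):
--         for i in range(len(seq) - k + 1):
--             wins.append(s[i:i + k])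
--
--     # one counting pass: totals in cnt, distinct k-mers in first-seen order
--     cnt = {}
--     order = []
--     for w in wins:
--         for kmer in neighbors(w):
--             c = cnt.get(kmer, 0)
--             if c == 0:
--                 order.append(kmer)
--             cnt[kmer] = c + 1
--
--     m = max(cnt[km] for km in order)
--     return [km for km in order if cnt[km] == m]
-- ===== Notes on version B (the rewrite author's own statement) =====
-- stated objective: alternative
-- what changed: The per-window recursive neighbour generation (4-way branching recursion re-deriving each suffix's neighbour list at every call) is replaced by an iterative bottom-up dynamic-programming table over suffix positions with one row per mismatch budget 0..d, built back-to-front and shared between budgets; the two counting passes are folded into one loop over (seq, reverse_complement(seq)) and the result is read off counter.items instead of re-looking every key up.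
import Mathlib
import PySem

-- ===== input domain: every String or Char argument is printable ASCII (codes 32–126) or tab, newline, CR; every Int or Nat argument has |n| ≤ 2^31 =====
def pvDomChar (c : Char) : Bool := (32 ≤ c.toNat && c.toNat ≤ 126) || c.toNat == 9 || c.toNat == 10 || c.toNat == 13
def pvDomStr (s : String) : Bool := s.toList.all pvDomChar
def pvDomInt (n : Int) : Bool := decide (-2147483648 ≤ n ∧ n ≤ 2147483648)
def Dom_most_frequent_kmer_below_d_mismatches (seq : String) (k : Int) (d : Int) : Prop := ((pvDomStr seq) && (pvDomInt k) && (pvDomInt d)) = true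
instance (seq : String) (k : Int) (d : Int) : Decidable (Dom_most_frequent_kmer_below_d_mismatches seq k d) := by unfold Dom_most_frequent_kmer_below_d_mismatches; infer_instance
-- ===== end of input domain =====

-- B replaces A's per-window recursive neighbour generation by an iterative suffix
-- dynamic-programming table (budgets 0..d, built back-to-front) and folds one loop
-- over (seq, reverse_complement(seq)); same return value, objective: alternative.

-- ===== PORT A =====
-- str.maketrans("ATGC","TACG") / ("AUGC","UACG") + str.translate: per-character map (exact)
def pvA_transDNA (c : Char) : Char :=
  if c = 'A' then 'T' else if c = 'T' then 'A' else if c = 'G' then 'C' else if c = 'C' then 'G' else c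
def pvA_transRNA (c : Char) : Char :=
  if c = 'A' then 'U' else if c = 'U' then 'A' else if c = 'G' then 'C' else if c = 'C' then 'G' else c
def pvA_reverse_complement (s : List Char) (rna : Bool) : List Char :=
  if rna then ((PySem.List.slice? s none none (-1)).getD []).map pvA_transRNA
  else ((PySem.List.slice? s none none (-1)).getD []).map pvA_transDNA

def pvA_lbdm (w : List Char) (d : Int) : List (List Char) :=
  match w with
  | [] => if d = 0 then [[]] else []   -- d ≠ 0 on "": Python raises IndexError on seq[0]; excluded by Pre_
  | c :: rest =>
    if d = 0 then [c :: rest]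
    else if rest.length = 0 ∧ 1 ≤ d then [['A'], ['T'], ['G'], ['C']]
    else ['A','T','G','C'].foldl (fun res b =>
      if c ≠ b then res ++ (pvA_lbdm rest (d-1)).map (fun suf => b :: suf)
      else res ++ (pvA_lbdm rest d).map (fun suf => b :: suf)) []

def most_frequent_kmer_below_d_mismatches (seq : String) (k : Int) (d : Int) : List String :=
  let s := seq.toList
  let counter : PySem.Dict (List Char) Int :=
    (PySem.List.pyRange 0 (PySem.List.len s - k + 1) 1).foldl (fun cnt i =>
      (pvA_lbdm (PySem.List.slice s (some i) (some (i + k))) d).foldl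
        (fun cnt kmer => cnt.modify kmer 0 (· + 1)) cnt) PySem.Dict.empty
  let r_seq := pvA_reverse_complement s false
  let counter :=
    (PySem.List.pyRange 0 (PySem.List.len s - k + 1) 1).foldl (fun cnt i =>
      (pvA_lbdm (PySem.List.slice r_seq (some i) (some (i + k))) d).foldl
        (fun cnt kmer => cnt.modify kmer 0 (· + 1)) cnt) counter
  let maxCnt := (PySem.List.max? counter.values (fun v => v)).getD 0  -- max() raises on empty counter; excluded by Pre_
  (counter.keys.filter (fun kmer => counter.getD kmer 0 == maxCnt)).map (fun cs => String.ofList cs)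

-- ===== PORT B =====
def pvB_comp : PySem.Dict Char Char := PySem.Dict.ofList [('A','T'),('T','A'),('G','C'),('C','G')]

def pvB_neighbors (w : List Char) (d : Int) : List (List Char) :=
  let kk : Int := PySem.List.len w
  let dd : Int := min d kk
  let rows0 : List (List (List Char)) := [[PySem.List.slice w (some kk) none]]
  let rows := (PySem.List.pyRange (kk - 1) (-1) (-1)).foldl (fun rows j =>
    (PySem.List.pyRange 1 (dd + 1) 1).foldl (fun new b =>
      if j = kk - 1 then new ++ [[['A'],['T'],['G'],['C']]]
      else new ++ [['A','T','G','C'].foldl (fun acc base =>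
          acc ++ (PySem.List.pyGetD rows (if some base == PySem.List.pyGet? w j then b else b - 1) []).map
            (fun suf => base :: suf)) []]
      ) [[PySem.List.slice w (some j) none]]
    ) rows0
  PySem.List.pyGetD rows dd []  -- rows[dd]; never out of range for d ≥ 0

def most_frequent_kmer_below_d_mismatches_alt (seq : String) (k : Int) (d : Int) : List String :=
  let s := seq.toList
  let rc := s.reverse.map (fun c => pvB_comp.getD c c)
  let wins := [s, rc].foldl (fun ws t =>
      (PySem.List.pyRange 0 (PySem.List.len s - k + 1) 1).foldl (fun ws i =>
        ws ++ [PySem.List.slice t (some i) (some (i + k))]) ws) []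
  -- cnt is only ever read back pointwise (get), never iterated: a hash map is a
  -- faithful port of the Python dict here; `order` keeps the first-seen order.
  let st : Std.HashMap (List Char) Int × Array (List Char) :=
    wins.foldl (fun st w =>
      (pvB_neighbors w d).foldl (fun (st : Std.HashMap (List Char) Int × Array (List Char)) kmer =>
        let c := st.1.getD kmer 0
        let order := if c == 0 then st.2.push kmer else st.2
        (st.1.insert kmer (c + 1), order)) st) (Std.HashMap.emptyWithCapacity, #[])
  let m := (PySem.List.max? (st.2.toList.map (fun km => st.1.getD km 0)) (fun v => v)).getD 0
    -- max() raises when no window exists; excluded by Pre_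
  (st.2.toList.filter (fun km => st.1.getD km 0 == m)).map (fun cs => String.ofList cs)

-- ===== PRECONDITION & SPEC =====
-- Pre_ is exactly where the Python A returns normally: A raises ValueError (max of empty
-- counter) when k > len(seq), and IndexError inside the neighbour recursion when d < 0
-- (with k ≥ 1) or when d ≠ 0 with k ≤ 0 (every window is then the empty string).
def Pre_most_frequent_kmer_below_d_mismatches (seq : String) (k : Int) (d : Int) : Prop :=
  k ≤ seq.toList.length ∧ ((k ≤ 0 ∧ d = 0) ∨ (1 ≤ k ∧ 0 ≤ d))
instance (seq : String) (k : Int) (d : Int) : Decidable (Pre_most_frequent_kmer_below_d_mismatches seq k d) := by unfold Pre_most_frequent_kmer_below_d_mismatches; infer_instance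

def pvWitness_most_frequent_kmer_below_d_mismatches : String × Int × Int := ("ACGT", 2, 1)

def Spec_most_frequent_kmer_below_d_mismatches (seq : String) (k : Int) (d : Int) (out : List String) : Prop := out = most_frequent_kmer_below_d_mismatches_alt seq k d
instance (seq : String) (k : Int) (d : Int) (out : List String) : Decidable (Spec_most_frequent_kmer_below_d_mismatches seq k d out) := by unfold Spec_most_frequent_kmer_below_d_mismatches; infer_instance

-- ===== CLAIM (what is proved, stated in full; the proofs are below) =====
def Claim_equal_most_frequent_kmer_below_d_mismatches : Prop := ∀ (seq : String) (k : Int) (d : Int), Dom_most_frequent_kmer_below_d_mismatches seq k d → Pre_most_frequent_kmer_below_d_mismatches seq k d → Spec_most_frequent_kmer_below_d_mismatches seq k d (most_frequent_kmer_below_d_mismatches seq k d)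

-- ===== LEMMAS AND PROOFS =====

-- the character maps agree
theorem pv_comp_eq (c : Char) : pvB_comp.getD c c = pvA_transDNA c := by
  have hit : pvB_comp.items = [('A','T'),('T','A'),('G','C'),('C','G')] := by decide
  unfold pvA_transDNA
  by_cases h1 : c = 'A'
  · subst h1; decide
  by_cases h2 : c = 'T'
  · subst h2; decide
  by_cases h3 : c = 'G'
  · subst h3; decide
  by_cases h4 : c = 'C'
  · subst h4; decide
  have e1 : ('A' == c) = false := by simp [Ne.symm h1]
  have e2 : ('T' == c) = false := by simp [Ne.symm h2]
  have e3 : ('G' == c) = false := by simp [Ne.symm h3]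
  have e4 : ('C' == c) = false := by simp [Ne.symm h4]
  simp [PySem.Dict.getD, PySem.Dict.get?, hit, List.find?, e1, e2, e3, e4, h1, h2, h3, h4]


-- B's reverse complement is A's
theorem pv_rc_eq (s : List Char) :
    s.reverse.map (fun c => pvB_comp.getD c c) = pvA_reverse_complement s false := by
  unfold pvA_reverse_complement
  simp [PySem.List.slice?_none_none_neg_one, pv_comp_eq]


theorem pv_lbdm_zero (w : List Char) : pvA_lbdm w 0 = [w] := by
  cases w <;> rfl

-- the loop body of B's DP, named so the fold can be reasoned about
def pvStep (w : List Char) (d : Int) (rows : List (List (List Char))) (j : Int) :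
    List (List (List Char)) :=
  (PySem.List.pyRange 1 (d + 1) 1).foldl (fun new b =>
      if j = (PySem.List.len w) - 1 then new ++ [[['A'],['T'],['G'],['C']]]
      else new ++ [['A','T','G','C'].foldl (fun acc base =>
          acc ++ (PySem.List.pyGetD rows (if some base == PySem.List.pyGet? w j then b else b - 1) []).map
            (fun suf => base :: suf)) []]
      ) [[PySem.List.slice w (some j) none]]

theorem pvB_neighbors_def (w : List Char) (d : Int) :
    pvB_neighbors w d =
      PySem.List.pyGetD
        ((PySem.List.pyRange ((PySem.List.len w) - 1) (-1) (-1)).foldl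
          (pvStep w (min d (PySem.List.len w)))
          [[PySem.List.slice w (some (PySem.List.len w)) none]]) (min d (PySem.List.len w)) [] := rfl

-- the budget table for the suffix starting at j
def pvTable (w : List Char) (d : Int) (j : Nat) : List (List (List Char)) :=
  (List.range (d.toNat + 1)).map (fun b : Nat => pvA_lbdm (w.drop j) (b : Int))

theorem pv_lbdm_single (c : Char) (b : Int) (hb : 1 ≤ b) :
    pvA_lbdm [c] b = [['A'], ['T'], ['G'], ['C']] := by
  unfold pvA_lbdm
  have hb0 : ¬ b = 0 := by omega
  simp [hb0, hb]

theorem pv_table_get (w : List Char) (d : Int) (m : Nat) (i : Int) (h0 : 0 ≤ i) (h1 : i ≤ d) :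
    PySem.List.pyGetD (pvTable w d m) i [] = pvA_lbdm (w.drop m) i := by
  rw [show i = ((i.toNat : Nat) : Int) by omega]
  rw [PySem.List.pyGetD_natCast]
  unfold pvTable
  rw [PySem.List.getD_map_range]
  omega

theorem pvStep_last (w : List Char) (d : Int) (rows : List (List (List Char)))
    (hw : w ≠ []) :
    pvStep w d rows ((w.length : Int) - 1) = pvTable w d (w.length - 1) := by
  obtain ⟨c, hc⟩ : ∃ c, w.drop (w.length - 1) = [c] := by
    apply List.length_eq_one_iff.mp
    rw [List.length_drop]
    have := List.length_pos_iff.mpr hw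
    omega
  unfold pvStep pvTable
  simp only [PySem.List.len_eq]
  simp only [if_true]
  rw [PySem.List.foldl_append_singleton_eq_map (f := fun _ => [['A'],['T'],['G'],['C']])]
  have hslice : PySem.List.slice w (some ((w.length : Int) - 1)) none = w.drop (w.length - 1) := by
    have h1 : ((w.length : Int) - 1) = ((w.length - 1 : Nat) : Int) := by
      have := List.length_pos_iff.mpr hw; omega
    rw [h1, PySem.List.slice_from_natCast]
  rw [hslice, hc, List.range_succ_eq_map, List.map_cons, List.map_map]
  have h0 : pvA_lbdm [c] ((0:Nat) : Int) = [[c]] := by rw [Nat.cast_zero, pv_lbdm_zero]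
  rw [h0]
  have ht : ∀ t ∈ List.range d.toNat,
      ((fun b : Nat => pvA_lbdm [c] (b : Int)) ∘ Nat.succ) t = [['A'],['T'],['G'],['C']] := by
    intro t _
    simp only [Function.comp_apply]
    exact pv_lbdm_single c ((Nat.succ t : Nat) : Int) (by omega)
  rw [List.map_congr_left ht, List.map_const', List.map_const']
  rw [PySem.List.length_pyRange_one 1 (d+1)]
  simp only [List.length_range, List.singleton_append]
  norm_num


theorem pvStep_mid (w : List Char) (d : Int) (j : Nat)
    (hj : j + 1 < w.length) :
    pvStep w d (pvTable w d (j + 1)) (j : Int) = pvTable w d j := by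
  have hj0 : j < w.length := by omega
  have hne : ¬ ((j : Int) = (w.length : Int) - 1) := by
    omega
  have hdrop : w[j] :: w.drop (j + 1) = w.drop j := List.getElem_cons_drop hj0
  have hget : PySem.List.pyGet? w (j : Int) = some w[j] := by
    rw [PySem.List.pyGet?_natCast, List.getElem?_eq_getElem hj0]
  have hrest : ¬ ((w.drop (j+1)).length = 0 ∧ True) := by
    rw [List.length_drop]; intro h; omega
  -- each inner budget row equals A's recursive list
  have hinner : ∀ b : Int, 1 ≤ b → b ≤ d →
      ['A','T','G','C'].foldl (fun acc base =>
          acc ++ (PySem.List.pyGetD (pvTable w d (j+1))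
              (if some base == PySem.List.pyGet? w (j : Int) then b else b - 1) []).map
            (fun suf => base :: suf)) []
        = pvA_lbdm (w.drop j) b := by
    intro b hb1 hb2
    conv_rhs => rw [← hdrop]
    rw [show pvA_lbdm (w[j] :: w.drop (j+1)) b
        = ['A','T','G','C'].foldl (fun res base =>
            if w[j] ≠ base then res ++ (pvA_lbdm (w.drop (j+1)) (b-1)).map (fun suf => base :: suf)
            else res ++ (pvA_lbdm (w.drop (j+1)) b).map (fun suf => base :: suf)) [] from by
      have hb0 : ¬ b = 0 := by omega
      have h2 : ¬ ((w.drop (j+1)).length = 0 ∧ 1 ≤ b) := by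
        rw [List.length_drop]; intro h; omega
      simp only [pvA_lbdm]
      rw [if_neg hb0, if_neg h2]]
    apply PySem.List.foldl_congr_mem
    intro acc base _
    rw [hget]
    by_cases hcb : base = w[j]
    · have : (some base == some w[j]) = true := by simp [hcb]
      rw [this, if_pos rfl, pv_table_get w d (j+1) b (by omega) hb2]
      simp [hcb]
    · have : (some base == some w[j]) = false := by simp [hcb]
      rw [this]
      simp only [Bool.false_eq_true, if_false]
      rw [pv_table_get w d (j+1) (b-1) (by omega) (by omega)]
      have : w[j] ≠ base := fun h => hcb h.symm
      simp [this]
  unfold pvStep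
  simp only [PySem.List.len_eq, if_neg hne]
  rw [PySem.List.foldl_append_singleton_eq_map]
  have hmap : (PySem.List.pyRange 1 (d+1) 1).map (fun b =>
      ['A','T','G','C'].foldl (fun acc base =>
          acc ++ (PySem.List.pyGetD (pvTable w d (j+1))
              (if some base == PySem.List.pyGet? w (j : Int) then b else b - 1) []).map
            (fun suf => base :: suf)) [])
      = (PySem.List.pyRange 1 (d+1) 1).map (fun b => pvA_lbdm (w.drop j) b) := by
    apply List.map_congr_left
    intro b hb
    have := (PySem.List.mem_pyRange_one).mp hb
    exact hinner b this.1 (by omega)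
  rw [hmap]
  have hslice : PySem.List.slice w (some (j : Int)) none = w.drop j :=
    PySem.List.slice_from_natCast w j
  rw [hslice]
  unfold pvTable
  rw [List.range_succ_eq_map, List.map_cons, List.map_map]
  rw [show pvA_lbdm (w.drop j) ((0:Nat) : Int) = [w.drop j] from by rw [Nat.cast_zero, pv_lbdm_zero]]
  rw [PySem.List.pyRange_one, List.map_map]
  have hd1 : d + 1 - 1 = d := by ring
  rw [hd1]
  simp only [List.singleton_append]
  congr 1
  apply List.map_congr_left
  intro t _
  simp only [Function.comp_apply]
  congr 1
  push_cast
  ring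


theorem pv_rows_inv (w : List Char) (d : Int) (hw : w ≠ []) :
    ∀ m : Nat, 1 ≤ m → m ≤ w.length →
      ((List.range m).map (fun t : Nat => ((w.length : Int) - 1) - t)).foldl (pvStep w d)
          [[PySem.List.slice w (some (PySem.List.len w)) none]]
        = pvTable w d (w.length - m) := by
  intro m
  induction m with
  | zero => intro h; omega
  | succ m ih =>
    intro _ hm
    by_cases hm1 : m = 0
    · subst hm1
      simp only [List.range_succ, List.range_zero, List.nil_append, List.map_cons, List.map_nil,
        List.foldl_cons, List.foldl_nil, Nat.cast_zero, sub_zero]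
      exact pvStep_last w d _ hw
    · have h1m : 1 ≤ m := by omega
      rw [List.range_succ, List.map_append, List.foldl_append, ih h1m (by omega)]
      simp only [List.map_cons, List.map_nil, List.foldl_cons, List.foldl_nil]
      have hj : ((w.length : Int) - 1) - (m : Int) = ((w.length - m - 1 : Nat) : Int) := by
        omega
      rw [hj]
      have heq : w.length - m = (w.length - m - 1) + 1 := by omega
      rw [heq]
      exact pvStep_mid w d (w.length - m - 1) (by omega)


theorem pv_lbdm_clamp (w : List Char) : w ≠ [] → ∀ b1 b2 : Int,
    (w.length : Int) ≤ b1 → (w.length : Int) ≤ b2 → pvA_lbdm w b1 = pvA_lbdm w b2 := by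
  induction w with
  | nil => intro h; exact absurd rfl h
  | cons c rest ih =>
    intro _ b1 b2 h1 h2
    cases rest with
    | nil =>
      simp only [List.length_cons, List.length_nil] at h1 h2
      rw [pv_lbdm_single c b1 (by omega), pv_lbdm_single c b2 (by omega)]
    | cons c2 r2 =>
      simp only [List.length_cons] at h1 h2
      have hb1 : ¬ b1 = 0 := by omega
      have hb2 : ¬ b2 = 0 := by omega
      have hr : ¬ ((c2 :: r2).length = 0 ∧ 1 ≤ b1) := by simp
      have hr2 : ¬ ((c2 :: r2).length = 0 ∧ 1 ≤ b2) := by simp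
      rw [pvA_lbdm.eq_def (c :: c2 :: r2) b1, pvA_lbdm.eq_def (c :: c2 :: r2) b2]
      simp only []
      rw [if_neg hb1, if_neg hb2, if_neg hr, if_neg hr2]
      apply PySem.List.foldl_congr_mem
      intro acc base _
      have hlen : ((c2 :: r2).length : Int) ≤ b1 - 1 ∧ ((c2 :: r2).length : Int) ≤ b2 - 1 ∧
          ((c2 :: r2).length : Int) ≤ b1 ∧ ((c2 :: r2).length : Int) ≤ b2 := by
        simp only [List.length_cons]; push_cast; omega
      by_cases hc : c ≠ base
      · rw [if_pos hc, if_pos hc, ih (by simp) (b1-1) (b2-1) hlen.1 hlen.2.1]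
      · rw [if_neg hc, if_neg hc, ih (by simp) b1 b2 hlen.2.2.1 hlen.2.2.2]

theorem pv_neighbors_eq (w : List Char) (d : Int) (hd : 0 ≤ d) (h : d = 0 ∨ w ≠ []) :
    pvB_neighbors w d = pvA_lbdm w d := by
  by_cases hw : w = []
  · subst hw
    have hd0 : d = 0 := by
      rcases h with h | h
      · exact h
      · exact absurd rfl h
    subst hd0; decide
  · rw [pvB_neighbors_def]
    have hn : 1 ≤ w.length := by
      cases w with
      | nil => exact absurd rfl hw
      | cons a t => simp
    have hD : 0 ≤ min d (PySem.List.len w) := by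
      simp only [PySem.List.len_eq, le_min_iff]
      constructor
      · exact hd
      · omega
    have hrange : PySem.List.pyRange ((PySem.List.len w) - 1) (-1) (-1)
        = (List.range w.length).map (fun t : Nat => ((w.length : Int) - 1) - t) := by
      rw [PySem.List.len_eq, PySem.List.pyRange_neg_one]
      have : ((w.length : Int) - 1 - (-1)).toNat = w.length := by omega
      rw [this]
    rw [hrange, pv_rows_inv w (min d (PySem.List.len w)) hw w.length hn le_rfl]
    have h0 : w.length - w.length = 0 := by omega
    rw [h0, pv_table_get w (min d (PySem.List.len w)) 0 (min d (PySem.List.len w)) hD le_rfl,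
      List.drop_zero]
    rcases le_or_gt d (PySem.List.len w) with hle | hgt
    · rw [min_eq_left hle]
    · rw [min_eq_right hgt.le]
      apply pv_lbdm_clamp w hw
      · simp [PySem.List.len_eq]
      · simp only [PySem.List.len_eq] at hgt; omega

-- the body of B's counting loop, exactly as the port writes it
def pvBStep (st : Std.HashMap (List Char) Int × Array (List Char)) (kmer : List Char) :
    Std.HashMap (List Char) Int × Array (List Char) :=
  let c := st.1.getD kmer 0
  let order := if c == 0 then st.2.push kmer else st.2
  (st.1.insert kmer (c + 1), order)

theorem pv_scan (K : List (List Char)) :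
    ∀ (H : List (List Char)) (cnt : Std.HashMap (List Char) Int) (ord : Array (List Char)),
      (∀ km, cnt.getD km 0 = (H.count km : Int)) → ord.toList = PySem.Set.ofList H →
      (∀ km, (K.foldl pvBStep (cnt, ord)).1.getD km 0 = ((H ++ K).count km : Int))
      ∧ (K.foldl pvBStep (cnt, ord)).2.toList = PySem.Set.ofList (H ++ K) := by
  induction K with
  | nil =>
    intro H cnt ord hc ho
    simpa using ⟨hc, ho⟩
  | cons x t ih =>
    intro H cnt ord hc ho
    have hx : cnt.getD x 0 = (H.count x : Int) := hc x
    have hstep : pvBStep (cnt, ord) x =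
        (cnt.insert x (cnt.getD x 0 + 1), if cnt.getD x 0 == 0 then ord.push x else ord) := rfl
    have hc' : ∀ km, (cnt.insert x (cnt.getD x 0 + 1)).getD km 0 = ((H ++ [x]).count km : Int) := by
      intro km
      rw [Std.HashMap.getD_insert]
      by_cases hxk : x = km
      · subst hxk
        simp [hx, List.count_append]
      · have : (x == km) = false := by simp [hxk]
        simp [this, hc km, List.count_append, List.count_singleton, hxk]
    have ho' : (if cnt.getD x 0 == 0 then ord.push x else ord).toList
        = PySem.Set.ofList (H ++ [x]) := by
      rw [PySem.Set.ofList_append_singleton]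
      by_cases hmem : x ∈ H
      · have h1 : (cnt.getD x 0 == 0) = false := by
          rw [hx]
          simp [List.count_eq_zero, hmem]
        have h2 : PySem.Set.add (PySem.Set.ofList H) x = PySem.Set.ofList H := by
          simp [PySem.Set.add, PySem.Set.contains, (PySem.Set.mem_ofList H x).mpr hmem]
        rw [h1]; simp only [Bool.false_eq_true, if_false]
        rw [ho, h2]
      · have h1 : (cnt.getD x 0 == 0) = true := by
          rw [hx]
          simp [List.count_eq_zero, hmem]
        have h2 : PySem.Set.add (PySem.Set.ofList H) x = PySem.Set.ofList H ++ [x] := by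
          have : x ∉ PySem.Set.ofList H := fun h => hmem ((PySem.Set.mem_ofList H x).mp h)
          simp [PySem.Set.add, PySem.Set.contains, this]
        rw [h1]; simp only [if_true]
        rw [Array.toList_push, ho, h2]
    have := ih (H ++ [x]) _ _ hc' ho'
    rw [List.foldl_cons, hstep]
    simpa [List.append_assoc] using this

-- ===== VERDICT (by name: the statement is the Claim_ definition above) =====
theorem pv_rcA_length (s : List Char) :
    (pvA_reverse_complement s false).length = s.length := by
  unfold pvA_reverse_complement
  simp [PySem.List.slice?_none_none_neg_one]

theorem pv_window_ne_nil (t : List Char) (n k i : Int)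
    (hn : t.length = n.toNat) (hk1 : 1 ≤ k) (hkn : k ≤ n) (hi0 : 0 ≤ i) (hi1 : i < n - k + 1) :
    PySem.List.slice t (some i) (some (i + k)) ≠ [] := by
  rw [PySem.List.slice_toNat t hi0 (by omega)]
  apply List.ne_nil_of_length_pos
  simp only [List.length_take, List.length_drop, hn]
  omega

-- nested counting loops over windows = one bump-fold over the k-mer stream = Counter(stream)
theorem pv_counter_two_pass (R1 : List Int) (f1 f2 : Int → List Char) (d : Int) :
    R1.foldl (fun cnt i => (pvA_lbdm (f2 i) d).foldl (fun cnt kmer => cnt.modify kmer 0 (· + 1)) cnt)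
      (R1.foldl (fun cnt i => (pvA_lbdm (f1 i) d).foldl (fun cnt kmer => cnt.modify kmer 0 (· + 1)) cnt)
        PySem.Dict.empty)
    = PySem.Dict.counter ((R1.map f1 ++ R1.map f2).flatMap (fun w => pvA_lbdm w d)) := by
  have h1 : ∀ (ws : List (List Char)) (c : PySem.Dict (List Char) Int),
      ws.foldl (fun cnt w => (pvA_lbdm w d).foldl (fun cnt kmer => cnt.modify kmer 0 (· + 1)) cnt) c
        = (ws.flatMap (fun w => pvA_lbdm w d)).foldl (fun cnt kmer => cnt.modify kmer 0 (· + 1)) c := by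
    intro ws c
    rw [List.foldl_flatMap]
  conv_rhs => rw [PySem.Dict.counter_eq_foldl, List.flatMap_append, List.foldl_append,
    ← h1 (R1.map f1) PySem.Dict.empty, ← h1 (R1.map f2), List.foldl_map, List.foldl_map]

theorem most_frequent_kmer_below_d_mismatches_spec : Claim_equal_most_frequent_kmer_below_d_mismatches := by
  intro seq k d _ hPre
  obtain ⟨hkn, hkd⟩ := hPre
  unfold Spec_most_frequent_kmer_below_d_mismatches
  have hd0 : 0 ≤ d := by rcases hkd with ⟨_, h⟩ | ⟨_, h⟩ <;> omega
  -- the window list, its k-mer stream, and the common right-hand form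
  let s : List Char := seq.toList
  let R : List Int := PySem.List.pyRange 0 (PySem.List.len s - k + 1) 1
  let rcA : List Char := pvA_reverse_complement s false
  let wins : List (List Char) :=
    R.map (fun i => PySem.List.slice s (some i) (some (i + k)))
      ++ R.map (fun i => PySem.List.slice rcA (some i) (some (i + k)))
  let K : List (List Char) := wins.flatMap (fun w => pvA_lbdm w d)
  let S : List (List Char) := PySem.Set.ofList K
  let F : List Char → Int := fun km => (K.count km : Int)
  let M : Int := (PySem.List.max? (S.map F) (fun v => v)).getD 0
  have hlen1 : s.length = (PySem.List.len s).toNat := by simp [PySem.List.len_eq]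
  have hlen2 : rcA.length = (PySem.List.len s).toNat := by
    rw [pv_rcA_length]; exact hlen1
  have hkn' : k ≤ PySem.List.len s := by simpa [PySem.List.len_eq, s] using hkn
  -- every window is nonempty unless d = 0
  have hcond : ∀ w ∈ wins, d = 0 ∨ w ≠ [] := by
    intro w hw
    rcases hkd with ⟨_, h0⟩ | ⟨hk1, _⟩
    · exact Or.inl h0
    · right
      rcases List.mem_append.mp hw with h | h
      · obtain ⟨i, hiR, rfl⟩ := List.mem_map.mp h
        obtain ⟨hi0, hi1⟩ := PySem.List.mem_pyRange_one.mp hiR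
        exact pv_window_ne_nil _ (PySem.List.len s) k i hlen1 hk1 hkn' hi0 hi1
      · obtain ⟨i, hiR, rfl⟩ := List.mem_map.mp h
        obtain ⟨hi0, hi1⟩ := PySem.List.mem_pyRange_one.mp hiR
        exact pv_window_ne_nil _ (PySem.List.len s) k i hlen2 hk1 hkn' hi0 hi1
  -- ===== side A =====
  have hA : most_frequent_kmer_below_d_mismatches seq k d
      = (S.filter (fun km => F km == M)).map (fun cs => String.ofList cs) := by
    simp only [most_frequent_kmer_below_d_mismatches]
    rw [pv_counter_two_pass R (fun i => PySem.List.slice s (some i) (some (i + k)))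
      (fun i => PySem.List.slice rcA (some i) (some (i + k))) d]
    simp only [PySem.Dict.keys_counter, PySem.Dict.getD_counter, PySem.Dict.values,
      PySem.Dict.items_counter, List.map_map]
    rfl
  -- ===== side B =====
  have hB : most_frequent_kmer_below_d_mismatches_alt seq k d
      = (S.filter (fun km => F km == M)).map (fun cs => String.ofList cs) := by
    simp only [most_frequent_kmer_below_d_mismatches_alt]
    rw [pv_rc_eq seq.toList]
    simp only [List.foldl_cons, List.foldl_nil]
    rw [PySem.List.foldl_append_singleton_eq_map, PySem.List.foldl_append_singleton_eq_map,
      List.nil_append]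
    rw [show (fun (st : Std.HashMap (List Char) Int × Array (List Char)) kmer =>
          (st.1.insert kmer (st.1.getD kmer 0 + 1),
            if st.1.getD kmer 0 == 0 then st.2.push kmer else st.2)) = pvBStep from rfl]
    rw [PySem.List.foldl_congr_mem
      (g := fun (st : Std.HashMap (List Char) Int × Array (List Char)) w =>
        (pvA_lbdm w d).foldl pvBStep st)
      (h := fun acc w hw => by rw [pv_neighbors_eq w d hd0 (hcond w hw)])]
    rw [← List.foldl_flatMap]
    obtain ⟨hcnt, hord⟩ := pv_scan K [] Std.HashMap.emptyWithCapacity #[]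
      (by intro km; simp) (by rfl)
    simp only [List.nil_append] at hcnt hord
    rw [hord]
    rw [List.map_congr_left (fun km _ => hcnt km), List.filter_congr (fun km _ => by rw [hcnt km])]
  rw [hA, hB]
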